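-- pv_equiv track=rewrite | github.com/AdityaJain1030/K4-free-graph-constructions | scripts/verify_dihedral.py | _aut_tables
-- ===== SOURCE A (Python) =====
-- from math import gcd
--
-- def _units_mod_p(p: int) -> list[int]:
--     return [u for u in range(1, p) if gcd(u, p) == 1]
--
-- def _aut_tables(p: int) -> list[list[int]]:
--     """Precompute index permutations induced by each Aut(D_p) element.
--
--     Returns a list of 2p-tuples; each maps index k ∈ {0,..,2p-1} to its
--     image under φ_{u,v}. Identity is included (u=1, v=0, first entry).
--     """
--     n = 2 * p
--     tables: list[list[int]] = []
--     for u in _units_mod_p(p):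
--         for v in range(p):
--             t = [0] * n
--             for i in range(p):
--                 t[i] = (u * i) % p
--             for j in range(p):
--                 t[p + j] = p + ((v + u * j) % p)
--             tables.append(t)
--     return tables
-- ===== SOURCE B (Python) =====
-- from math import gcd
--
-- def _aut_tables(p: int) -> list[list[int]]:
--     # B: compose two precomputed permutation families by table lookup,
--     # table_{u,v}[k] = S_v[M_u[k]]: S_v fixes the first half and shifts the
--     # second, M_u is the full 2p multiplication permutation. The (u,v) body
--     # does no modular arithmetic at all, only indexing.
--     idx = list(range(p))
--     shifts = [idx + [p + (v + j) % p for j in idx] for v in range(p)]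
--     tables = []
--     for u in range(1, p):
--         if gcd(u, p) == 1:
--             half = [u * i % p for i in idx]
--             M = half + [p + m for m in half]
--             tables += [[s[m] for m in M] for s in shifts]
--     return tables
-- ===== Notes on version B (the rewrite author's own statement) =====
-- stated objective: alternative
-- what changed: B builds two precomputed permutation families once (the p shift permutations S_v and, per unit, the full 2p multiplication permutation M_u) and produces each table as the composition S_v o M_u by pure table lookup, instead of A's per-(u,v) fill of a zero table by two index-assignment loops doing modular arithmetic per entry.
import Mathlib
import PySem

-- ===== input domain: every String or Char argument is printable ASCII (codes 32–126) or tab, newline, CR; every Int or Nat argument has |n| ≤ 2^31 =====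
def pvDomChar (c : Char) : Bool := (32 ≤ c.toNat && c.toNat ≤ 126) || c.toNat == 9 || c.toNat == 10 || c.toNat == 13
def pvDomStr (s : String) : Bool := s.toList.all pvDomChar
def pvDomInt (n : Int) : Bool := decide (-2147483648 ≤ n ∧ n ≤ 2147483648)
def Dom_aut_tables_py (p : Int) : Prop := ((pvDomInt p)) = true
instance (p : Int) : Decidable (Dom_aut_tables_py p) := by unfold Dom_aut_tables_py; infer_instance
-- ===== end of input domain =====

-- B produces each table as the composition S_v ∘ M_u of two precomputed permutation
-- families (shift tables S_v and per-unit multiplication tables M_u) by pure table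
-- lookup, instead of A's per-(u,v) index-assignment fill of a zero table; alternative
-- decomposition, same output.


-- ===== PORT A =====
-- _units_mod_p
def pvUnitsModP (p : Int) : List Int :=
  (PySem.List.pyRange 1 p 1).filter (fun u => Int.gcd u p == 1)

-- the body of A's v-loop: t = [0]*n, two index-assignment loops
def pvFillT (p u v : Int) : List Int :=
  let n := 2 * p
  let t := List.replicate n.toNat (0 : Int)
  let t := (PySem.List.pyRange 0 p 1).foldl
    (fun t i => PySem.List.pySetD t i (PySem.Int.mod (u * i) p)) t
  (PySem.List.pyRange 0 p 1).foldl
    (fun t j => PySem.List.pySetD t (p + j) (p + PySem.Int.mod (v + u * j) p)) t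

def aut_tables_py (p : Int) : List (List Int) :=
  (pvUnitsModP p).foldl (fun tables u =>
    (PySem.List.pyRange 0 p 1).foldl (fun tables v => tables ++ [pvFillT p u v]) tables) []

-- ===== PORT B =====
def aut_tables_py_alt (p : Int) : List (List Int) :=
  let idx := PySem.List.pyRange 0 p 1
  let shifts := idx.map (fun v => idx ++ idx.map (fun j => p + PySem.Int.mod (v + j) p))
  (PySem.List.pyRange 1 p 1).foldl (fun tables u =>
    if Int.gcd u p == 1 then
      let half := idx.map (fun i => PySem.Int.mod (u * i) p)
      let M := half ++ half.map (fun m => p + m)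
      tables ++ shifts.map (fun s => M.map (fun m => PySem.List.pyGetD s m 0))
    else tables) []

-- ===== PRECONDITION & SPEC =====
def Spec_aut_tables_py (p : Int) (out : List (List Int)) : Prop := out = aut_tables_py_alt p
instance (p : Int) (out : List (List Int)) : Decidable (Spec_aut_tables_py p out) := by unfold Spec_aut_tables_py; infer_instance

-- ===== CLAIM (what is proved, stated in full; the proofs are below) =====
def Claim_equal_aut_tables_py : Prop := ∀ (p : Int), Dom_aut_tables_py p → Spec_aut_tables_py p (aut_tables_py p)

-- ===== LEMMAS AND PROOFS =====

-- (a % p + b) % p = (a + b) % p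
theorem pv_emod_add_left (p a b : Int) : (a % p + b) % p = (a + b) % p := by
  rw [Int.add_emod, Int.emod_emod_of_dvd _ dvd_rfl, ← Int.add_emod]

-- filling indices 0..n-1 of l with g via pySetD = map g (range n) ++ rest of l
theorem pv_fill_zero (g : Int → Int) : ∀ (n : Nat) (l : List Int), n ≤ l.length →
    (PySem.List.pyRange 0 (n : Int) 1).foldl (fun t i => PySem.List.pySetD t i (g i)) l
      = (PySem.List.pyRange 0 (n : Int) 1).map g ++ l.drop n := by
  intro n
  induction n with
  | zero => intro l _; simp
  | succ n ih =>
    intro l hl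
    have hcast : ((n + 1 : Nat) : Int) = (n : Int) + 1 := by push_cast; ring
    rw [hcast, PySem.List.pyRange_one_succ_right (by omega : (0:Int) ≤ n)]
    rw [List.foldl_append, List.map_append, ih l (by omega)]
    have hlen : ((PySem.List.pyRange 0 (n : Int) 1).map g).length = n := by
      simp [PySem.List.length_pyRange_one]
    have hdrop : l.drop n = l[n] :: l.drop (n + 1) :=
      List.drop_eq_getElem_cons (by omega)
    simp only [List.foldl_cons, List.foldl_nil, PySem.List.pySetD_natCast]
    rw [List.set_append, hlen]
    simp only [lt_self_iff_false, if_false, Nat.sub_self]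
    rw [hdrop, List.set_cons_zero]
    simp

-- a pySetD at off+j (0 ≤ j) passes over a prefix of length off
theorem pv_fill_offset (f : Int → Int) (off : Int) (hoff : 0 ≤ off) :
    ∀ (rng : List Int) (xs ys : List Int), (∀ j ∈ rng, 0 ≤ j) → xs.length = off.toNat →
    rng.foldl (fun t j => PySem.List.pySetD t (off + j) (f j)) (xs ++ ys)
      = xs ++ rng.foldl (fun t j => PySem.List.pySetD t j (f j)) ys := by
  intro rng
  induction rng with
  | nil => intro xs ys _ _; simp
  | cons j rng ih =>
    intro xs ys hmem hlen
    have hj : 0 ≤ j := hmem j (by simp)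
    have hstep : PySem.List.pySetD (xs ++ ys) (off + j) (f j)
        = xs ++ PySem.List.pySetD ys j (f j) := by
      rw [PySem.List.pySetD_of_nonneg _ _ (by omega : (0:Int) ≤ off + j),
          PySem.List.pySetD_of_nonneg _ _ hj, List.set_append]
      have h1 : (off + j).toNat = xs.length + j.toNat := by omega
      have h2 : ¬ (off + j).toNat < xs.length := by omega
      rw [if_neg h2, h1]
      simp
    simp only [List.foldl_cons, hstep]
    exact ih xs _ (fun x hx => hmem x (by simp [hx])) hlen

-- A's per-(u,v) table as two mapped halves
theorem pv_fillT_eq (p u v : Int) (hp : 0 < p) :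
    pvFillT p u v = (PySem.List.pyRange 0 p 1).map (fun i => PySem.Int.mod (u * i) p)
      ++ (PySem.List.pyRange 0 p 1).map (fun j => p + PySem.Int.mod (v + u * j) p) := by
  have hcast : ((p.toNat : Nat) : Int) = p := Int.toNat_of_nonneg (by omega)
  have h2 : ((2 * p).toNat) = p.toNat + p.toNat := by omega
  have hfill1 := pv_fill_zero (fun i => PySem.Int.mod (u * i) p) p.toNat
    (List.replicate (2 * p).toNat 0) (by simp [h2])
  rw [hcast] at hfill1
  have hfill2 := pv_fill_zero (fun j => p + PySem.Int.mod (v + u * j) p) p.toNat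
    (List.replicate p.toNat 0) (by simp)
  rw [hcast] at hfill2
  unfold pvFillT
  simp only []
  rw [hfill1, List.drop_replicate, h2, Nat.add_sub_cancel_left]
  rw [pv_fill_offset (fun j => p + PySem.Int.mod (v + u * j) p) p (by omega)
      (PySem.List.pyRange 0 p 1)
      ((PySem.List.pyRange 0 p 1).map (fun i => PySem.Int.mod (u * i) p))
      (List.replicate p.toNat 0)
      (fun j hj => ((PySem.List.mem_pyRange_one).1 hj).1)
      (by simp [PySem.List.length_pyRange_one])]
  rw [hfill2, List.drop_replicate, Nat.sub_self]
  simp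

-- lookup in S_v = idx ++ idx.map f, first half: s[m] = m for 0 ≤ m < p
theorem pv_lookup_lo (p m : Int) (f : Int → Int) (h0 : 0 ≤ m) (h1 : m < p) :
    PySem.List.pyGetD (PySem.List.pyRange 0 p 1 ++ (PySem.List.pyRange 0 p 1).map f) m 0 = m := by
  have hlen : (PySem.List.pyRange 0 p 1).length = p.toNat := by
    simp [PySem.List.length_pyRange_one]
  rw [PySem.List.pyGetD_eq_getElem _ 0 h0 (by simp [hlen]; omega)]
  rw [List.getElem_append_left (by omega)]
  rw [PySem.List.getElem_pyRange_one]
  omega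

-- lookup in S_v, second half: s[p + m] = f m for 0 ≤ m < p
theorem pv_lookup_hi (p m : Int) (f : Int → Int) (h0 : 0 ≤ m) (h1 : m < p) :
    PySem.List.pyGetD (PySem.List.pyRange 0 p 1 ++ (PySem.List.pyRange 0 p 1).map f) (p + m) 0
      = f m := by
  have hlen : (PySem.List.pyRange 0 p 1).length = p.toNat := by
    simp [PySem.List.length_pyRange_one]
  rw [PySem.List.pyGetD_eq_getElem _ 0 (by omega : (0:Int) ≤ p + m) (by simp [hlen]; omega)]
  rw [List.getElem_append_right (by omega)]
  have : (p + m).toNat - (PySem.List.pyRange 0 p 1).length = m.toNat := by omega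
  simp only [this]
  have := PySem.List.getElem_pyRange_one (a := 0) (b := p) (k := m.toNat)
    (h := by rw [hlen] at *; omega)
  rw [List.getElem_map]
  rw [this]
  congr 1
  omega

-- pointwise-equal flatMaps agree
theorem pv_flatMap_congr {α β : Type} (l : List α) (f g : α → List β)
    (h : ∀ x ∈ l, f x = g x) : l.flatMap f = l.flatMap g := by
  induction l with
  | nil => rfl
  | cons x l ih =>
    simp only [List.flatMap_cons, h x (by simp),
      ih (fun y hy => h y (by simp [hy]))]

-- flatMap through a boolean guard = flatMap of the filter
theorem pv_flatMap_if {α β : Type} (l : List α) (c : α → Bool) (g : α → List β) :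
    l.flatMap (fun x => if c x then g x else []) = (l.filter c).flatMap g := by
  induction l with
  | nil => rfl
  | cons x l ih =>
    by_cases h : c x <;> simp [h, ih]

-- B's per-(u,v) table (lookup composition) equals A's filled table
theorem pv_table_eq (p u v : Int) (hp : 0 < p) :
    ((PySem.List.pyRange 0 p 1).map (fun i => PySem.Int.mod (u * i) p)
      ++ ((PySem.List.pyRange 0 p 1).map (fun i => PySem.Int.mod (u * i) p)).map
          (fun m => p + m)).map
      (fun m => PySem.List.pyGetD
        (PySem.List.pyRange 0 p 1
          ++ (PySem.List.pyRange 0 p 1).map (fun j => p + PySem.Int.mod (v + j) p)) m 0)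
    = pvFillT p u v := by
  rw [pv_fillT_eq p u v hp, List.map_append]
  have hmem : ∀ m ∈ (PySem.List.pyRange 0 p 1).map (fun i => PySem.Int.mod (u * i) p),
      0 ≤ m ∧ m < p := by
    intro m hm
    obtain ⟨i, _, rfl⟩ := List.mem_map.1 hm
    rw [PySem.Int.mod_eq_emod_of_pos hp]
    exact ⟨Int.emod_nonneg _ (by omega), Int.emod_lt_of_pos _ hp⟩
  congr 1
  · calc ((PySem.List.pyRange 0 p 1).map (fun i => PySem.Int.mod (u * i) p)).map
          (fun m => PySem.List.pyGetD _ m 0)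
        = ((PySem.List.pyRange 0 p 1).map (fun i => PySem.Int.mod (u * i) p)).map id := by
          apply List.map_congr_left
          intro m hm
          exact pv_lookup_lo p m _ (hmem m hm).1 (hmem m hm).2
      _ = _ := by simp
  · simp only [List.map_map]
    apply List.map_congr_left
    intro i hi
    obtain ⟨h0, h1⟩ := (PySem.List.mem_pyRange_one).1 hi
    simp only [Function.comp]
    have hm := hmem (PySem.Int.mod (u * i) p) (List.mem_map.2 ⟨i, hi, rfl⟩)
    rw [pv_lookup_hi p _ _ hm.1 hm.2]
    congr 1
    simp only [PySem.Int.mod_eq_emod_of_pos hp]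
    rw [Int.add_comm v (u * i % p), pv_emod_add_left, Int.add_comm (u * i) v]

-- ===== VERDICT (by name: the statement is the Claim_ definition above) =====
theorem aut_tables_py_spec : Claim_equal_aut_tables_py := by
  intro p _
  unfold Spec_aut_tables_py aut_tables_py aut_tables_py_alt pvUnitsModP
  by_cases hp : 0 < p
  · simp only []
    -- A: fold of folds → flatMap over filtered units of mapped tables
    have hA : ∀ (init : List (List Int)) (us : List Int),
        us.foldl (fun tables u =>
          (PySem.List.pyRange 0 p 1).foldl (fun tables v => tables ++ [pvFillT p u v]) tables) init
        = init ++ us.flatMap (fun u => (PySem.List.pyRange 0 p 1).map (pvFillT p u)) := by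
      intro init us
      induction us generalizing init with
      | nil => simp
      | cons u us ih =>
        rw [List.foldl_cons, PySem.List.foldl_append_singleton_eq_map, ih,
          List.flatMap_cons, List.append_assoc]
    rw [hA]
    -- B: fold with guard → flatMap of filter
    have hB : ∀ (init : List (List Int)),
        (PySem.List.pyRange 1 p 1).foldl (fun tables u =>
          if Int.gcd u p == 1 then
            tables ++ ((PySem.List.pyRange 0 p 1).map
              (fun v => PySem.List.pyRange 0 p 1
                ++ (PySem.List.pyRange 0 p 1).map (fun j => p + PySem.Int.mod (v + j) p))).map
              (fun s => ((PySem.List.pyRange 0 p 1).map (fun i => PySem.Int.mod (u * i) p)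
                ++ ((PySem.List.pyRange 0 p 1).map (fun i => PySem.Int.mod (u * i) p)).map
                    (fun m => p + m)).map (fun m => PySem.List.pyGetD s m 0))
          else tables) init
        = init ++ ((PySem.List.pyRange 1 p 1).filter (fun u => Int.gcd u p == 1)).flatMap
            (fun u => ((PySem.List.pyRange 0 p 1).map
              (fun v => PySem.List.pyRange 0 p 1
                ++ (PySem.List.pyRange 0 p 1).map (fun j => p + PySem.Int.mod (v + j) p))).map
              (fun s => ((PySem.List.pyRange 0 p 1).map (fun i => PySem.Int.mod (u * i) p)
                ++ ((PySem.List.pyRange 0 p 1).map (fun i => PySem.Int.mod (u * i) p)).map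
                    (fun m => p + m)).map (fun m => PySem.List.pyGetD s m 0))) := by
      intro init
      rw [← pv_flatMap_if]
      induction (PySem.List.pyRange 1 p 1) generalizing init with
      | nil => simp
      | cons u us ih =>
        rw [List.foldl_cons, List.flatMap_cons]
        by_cases h : Int.gcd u p == 1
        · rw [if_pos h, if_pos h, ih, List.append_assoc]
        · rw [if_neg h, if_neg h, ih, List.nil_append]
    rw [hB]
    congr 1
    refine pv_flatMap_congr _ _ _ (fun u hu => ?_)
    rw [List.map_map]
    refine List.map_congr_left (fun v hv => ?_)
    simp only [Function.comp]
    exact (pv_table_eq p u v hp).symm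
  · rw [PySem.List.pyRange_one_eq_nil (by omega : p ≤ 1)]
    simp [PySem.List.pyRange_one_eq_nil (by omega : p ≤ 0)]
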